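-- pv_equiv track=rewrite | github.com/alpaka99/algorithm | im_test/skill_tree2.py | pop_skill
-- ===== SOURCE A (Python) =====
-- def pop_skill(pop_list:list, user_skill):
--     # pop_list가 다 비었음 -> 스킬이 순서대로 찍힘
--     cur_pos = 0
--     while pop_list:
--         if user_skill[cur_pos] in pop_list: # user_skill에서 내가 가리키고 있는게 pop_list에 있음
--             if user_skill[cur_pos] == pop_list[0]:
--                 pop_list.pop(0)
--             else: # 순서대로가 아님
--                 return 0
--         cur_pos += 1
--         if cur_pos > len(pop_list):
--             break
--     return 1
-- ===== SOURCE B (Python) =====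
-- def pop_skill(pop_list: list, user_skill):
--     # Multiset of remaining required skills (dict of counts) + head pointer:
--     # one pass over user_skill, no rescanning of pop_list, no mutation.
--     counts = {}
--     for s in pop_list:
--         counts[s] = counts.get(s, 0) + 1
--     k = 0
--     for s in user_skill:
--         if k == len(pop_list):
--             break
--         if s == pop_list[k]:
--             counts[s] -= 1
--             k += 1
--         elif counts.get(s, 0) > 0:
--             return 0
--     return 1
-- ===== Notes on version B (the rewrite author's own statement) =====
-- stated objective: alternative
-- what changed: B replaces A's mutated pop_list with its repeated `in pop_list` scans and pop(0) shifts by a dict of remaining-skill counts built once plus a head pointer, in one pass over all of user_skill (O(n+m) vs A's O(n*m) worst case, though a timing run measured only 1.28x at the largest size); Pre_ excludes exactly the inputs on which A raises IndexError by running its cursor off user_skill.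
-- intended difference: On inputs where the first out-of-order required skill in user_skill appears only after A's accidental cursor/remaining-length break (more steps taken than required skills then remaining), A stops early and returns 1, while B scans all of user_skill and returns 0, which is the intended answer since the user does acquire a required skill out of order. — e.g. on pop_skill([1, 2], [3, 3, 3, 2]): A returns 1, B returns 0
import Mathlib
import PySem

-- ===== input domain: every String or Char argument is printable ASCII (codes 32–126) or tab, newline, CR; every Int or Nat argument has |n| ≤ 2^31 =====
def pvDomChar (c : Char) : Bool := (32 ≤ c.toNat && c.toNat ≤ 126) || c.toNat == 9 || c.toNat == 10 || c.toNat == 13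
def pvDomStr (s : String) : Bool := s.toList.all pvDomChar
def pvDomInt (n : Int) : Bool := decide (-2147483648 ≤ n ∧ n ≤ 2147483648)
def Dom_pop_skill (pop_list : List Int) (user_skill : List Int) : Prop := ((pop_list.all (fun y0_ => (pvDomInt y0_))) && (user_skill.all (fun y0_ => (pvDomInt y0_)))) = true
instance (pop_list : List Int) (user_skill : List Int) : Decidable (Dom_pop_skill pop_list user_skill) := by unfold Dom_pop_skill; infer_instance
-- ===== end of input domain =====

-- B replaces A's repeated `in pop_list` scans and pop(0) mutation by a dict of remaining-skill
-- counts plus a head pointer, one pass over user_skill (objective: alternative). A mutates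
-- pop_list in place; the equivalence proved is about the RETURN value only (B does not mutate).
-- A's early cursor/remaining-length break can return 1 although a required skill still comes
-- out of order later in user_skill; B returns 0 there (the D_ block below states this).

-- ===== PORT A =====
-- while-loop over mutable (pop_list, cur_pos); IndexError on user_skill[cur_pos] is modelled
-- by pyGet? returning none (that branch returns a junk 0; Pre_ excludes those inputs).
def pop_skill_loop (user : List Int) (p : List Int) (i : Nat) : Int :=
  match p with
  | [] => 1
  | h :: t =>
    match hx : PySem.List.pyGet? user (i : Int) with
    | none => 0  -- Python raises IndexError here; outside Pre_
    | some x =>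
      if (h :: t).contains x then
        if x = h then
          -- pop_list.pop(0); then cur_pos += 1 and the break check on the NEW list
          if i + 1 > t.length then 1 else pop_skill_loop user t (i + 1)
        else 0
      else
        if i + 1 > (h :: t).length then 1 else pop_skill_loop user (h :: t) (i + 1)
  termination_by user.length - i
  decreasing_by
  all_goals
    have hi : i < user.length := by
      have := hx
      simp [PySem.List.pyGet?_natCast] at this
      exact (List.getElem?_eq_some_iff.mp this).1
    omega

def pop_skill (pop_list : List Int) (user_skill : List Int) : Int :=
  pop_skill_loop user_skill pop_list 0

-- ===== PORT B =====
-- single pass over user_skill: counts = multiset of remaining required skills, k = head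
-- pointer; `pop_list[k]` (reached only with k < len) is rendered totally via pyGet?.
def pop_skill_alt_loop (pop : List Int) (counts : PySem.Dict Int Int) (k : Nat) :
    List Int → Int
  | [] => 1
  | s :: rest =>
    if k = pop.length then 1
    else if PySem.List.pyGet? pop (k : Int) = some s then
      pop_skill_alt_loop pop (counts.insert s (counts.getD s 0 - 1)) (k + 1) rest
    else if counts.getD s 0 > 0 then 0
    else pop_skill_alt_loop pop counts k rest

def pop_skill_alt (pop_list : List Int) (user_skill : List Int) : Int :=
  let counts := pop_list.foldl (fun d s => d.insert s (d.getD s 0 + 1)) PySem.Dict.empty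
  pop_skill_alt_loop pop_list counts 0 user_skill

-- ===== PRECONDITION & SPEC =====

-- pvGk pop k xs: the head pointer after greedily matching pop (from position k) against xs.
def pvGk (pop : List Int) (k : Nat) (xs : List Int) : Nat :=
  xs.foldl (fun k s => if pop[k]? = some s then k + 1 else k) k

-- pvMis pop k s: s is still required (occurs in pop.drop k) but is not the next required skill.
def pvMis (pop : List Int) (k : Nat) (s : Int) : Bool :=
  (pop.drop k).contains s && !(pop[k]? == some s)

-- A returns (rather than raising IndexError) iff pop_list is empty, or some user skill is an
-- out-of-order required skill, or the cursor/remaining-length break is reached in time.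
def Pre_pop_skill (pop_list : List Int) (user_skill : List Int) : Prop :=
  pop_list = [] ∨
  (∃ j < user_skill.length,
      pvMis pop_list (pvGk pop_list 0 (user_skill.take j)) user_skill[j]! = true) ∨
  (user_skill ≠ [] ∧ pop_list.length < user_skill.length + pvGk pop_list 0 user_skill)
instance (pop_list : List Int) (user_skill : List Int) : Decidable (Pre_pop_skill pop_list user_skill) := by
  unfold Pre_pop_skill; infer_instance

def pvWitness_pop_skill : List Int × List Int := ([1, 3], [1, 2, 3])

-- pvLateMis j rem u: scanning u with j skills processed so far and rem the required skills
-- still to acquire, some still-required skill is acquired out of order, and the first such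
-- skill comes after more steps than required skills then remaining (A's break fires first).
def pvLateMis (j : Nat) (rem : List Int) : List Int → Bool
  | [] => false
  | s :: xs =>
    if rem.head? = some s then pvLateMis (j + 1) rem.tail xs
    else if s ∈ rem then rem.length.blt j
    else pvLateMis (j + 1) rem xs

-- On inputs whose first out-of-order required skill comes only after A's accidental
-- cursor/remaining-length break, A stops early and returns 1 while B scans all of user_skill
-- and returns 0, the intended answer: the user does acquire a required skill out of order.
def D_pop_skill (pop_list : List Int) (user_skill : List Int) : Prop :=
  pvLateMis 0 pop_list user_skill
instance (pop_list : List Int) (user_skill : List Int) : Decidable (D_pop_skill pop_list user_skill) := by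
  unfold D_pop_skill; infer_instance

def Spec_pop_skill (pop_list : List Int) (user_skill : List Int) (out : Int) : Prop := ¬ D_pop_skill pop_list user_skill → out = pop_skill_alt pop_list user_skill
instance (pop_list : List Int) (user_skill : List Int) (out : Int) : Decidable (Spec_pop_skill pop_list user_skill out) := by unfold Spec_pop_skill; infer_instance

def pvDiffWitness_pop_skill : List Int × List Int := ([1, 2], [3, 3, 3, 2])
def pvDiffWitnessOut_pop_skill : Int × Int := (1, 0)

-- ===== CLAIM =====
def Claim_unchanged_pop_skill : Prop := ∀ (pop_list : List Int) (user_skill : List Int), Dom_pop_skill pop_list user_skill → Pre_pop_skill pop_list user_skill → Spec_pop_skill pop_list user_skill (pop_skill pop_list user_skill)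
def Claim_changed_pop_skill : Prop := Dom_pop_skill (pvDiffWitness_pop_skill.1) (pvDiffWitness_pop_skill.2) ∧ Pre_pop_skill (pvDiffWitness_pop_skill.1) (pvDiffWitness_pop_skill.2) ∧ D_pop_skill (pvDiffWitness_pop_skill.1) (pvDiffWitness_pop_skill.2) ∧ pop_skill (pvDiffWitness_pop_skill.1) (pvDiffWitness_pop_skill.2) = pvDiffWitnessOut_pop_skill.1 ∧ pop_skill_alt (pvDiffWitness_pop_skill.1) (pvDiffWitness_pop_skill.2) = pvDiffWitnessOut_pop_skill.2 ∧ pvDiffWitnessOut_pop_skill.1 ≠ pvDiffWitnessOut_pop_skill.2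
def Claim_exact_pop_skill : Prop := ∀ (pop_list : List Int) (user_skill : List Int), Dom_pop_skill pop_list user_skill → Pre_pop_skill pop_list user_skill → D_pop_skill pop_list user_skill → pop_skill pop_list user_skill ≠ pop_skill_alt pop_list user_skill

-- ===== LEMMAS AND PROOFS =====

-- first mismatch in a user suffix, starting from head pointer k: (offset, pointer there)
def pvFirstMis (pop : List Int) (k : Nat) : List Int → Option (Nat × Nat)
  | [] => none
  | s :: rest =>
    if pop[k]? = some s then
      (pvFirstMis pop (k + 1) rest).map (fun p => (p.1 + 1, p.2))
    else if (pop.drop k).contains s then some (0, k)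
    else (pvFirstMis pop k rest).map (fun p => (p.1 + 1, p.2))

lemma pvGk_nil (pop : List Int) (k : Nat) : pvGk pop k [] = k := rfl

lemma pvGk_cons (pop : List Int) (k : Nat) (s : Int) (xs : List Int) :
    pvGk pop k (s :: xs) =
      pvGk pop (if pop[k]? = some s then k + 1 else k) xs := by
  simp only [pvGk, List.foldl_cons]

lemma pvGk_ge (pop : List Int) (xs : List Int) : ∀ k, k ≤ pvGk pop k xs := by
  induction xs with
  | nil => intro k; simp [pvGk_nil]
  | cons s rest ih =>
    intro k
    rw [pvGk_cons]
    split
    · exact le_trans (by omega) (ih (k + 1))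
    · exact ih k

lemma pvGk_le_len (pop : List Int) (xs : List Int) :
    ∀ k, k ≤ pop.length → pvGk pop k xs ≤ pop.length := by
  induction xs with
  | nil => intro k h; simpa [pvGk_nil] using h
  | cons s rest ih =>
    intro k h
    rw [pvGk_cons]
    split
    · next hh =>
      have hk : k < pop.length := (List.getElem?_eq_some_iff.mp hh).1
      exact ih (k + 1) (by omega)
    · exact ih k h

lemma pvFirstMis_none_of_ge (pop : List Int) (xs : List Int) :
    ∀ k, pop.length ≤ k → pvFirstMis pop k xs = none := by
  induction xs with
  | nil => intro k _; rfl
  | cons s rest ih =>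
    intro k h
    have hd : pop.drop k = [] := List.drop_eq_nil_iff.mpr h
    rw [pvFirstMis, if_neg (by rw [List.getElem?_eq_none h]; simp), if_neg (by rw [hd]; simp),
      ih k h]
    rfl

lemma pvFirstMis_some (pop : List Int) (xs : List Int) :
    ∀ k j kj, pvFirstMis pop k xs = some (j, kj) →
      j < xs.length ∧ k ≤ kj ∧ kj ≤ k + j ∧ kj < pop.length ∧
      kj = pvGk pop k (xs.take j) ∧
      pvMis pop kj xs[j]! = true ∧
      (∀ j' < j, pvMis pop (pvGk pop k (xs.take j')) xs[j']! = false) := by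
  induction xs with
  | nil => intro k j kj h; simp [pvFirstMis] at h
  | cons s rest ih =>
    intro k j kj h
    rw [pvFirstMis] at h
    by_cases hadv : pop[k]? = some s
    · rw [if_pos hadv] at h
      match hr : pvFirstMis pop (k + 1) rest with
      | none => rw [hr] at h; simp at h
      | some (j', kj') =>
        rw [hr] at h
        simp at h
        obtain ⟨rfl, rfl⟩ := h
        obtain ⟨h1, h2, h3, h4, h5, h6, h7⟩ := ih (k + 1) j' kj' hr
        refine ⟨by simp only [List.length_cons]; omega, by omega, by omega, h4, ?_, ?_, ?_⟩
        · rw [List.take_succ_cons, pvGk_cons, if_pos hadv]; exact h5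
        · rw [List.getElem!_cons_succ]; exact h6
        · intro j'' hj''
          match j'' with
          | 0 =>
            simp only [List.getElem!_cons_zero, List.take_zero, pvGk_nil]
            simp [pvMis, hadv]
          | Nat.succ j3 =>
            have := h7 j3 (by omega)
            rw [List.take_succ_cons, pvGk_cons, if_pos hadv, List.getElem!_cons_succ]
            exact this
    · rw [if_neg hadv] at h
      by_cases hc : (pop.drop k).contains s
      · rw [if_pos hc] at h
        simp at h
        obtain ⟨rfl, rfl⟩ := h
        have hklt : k < pop.length := by
          by_contra hk
          rw [List.drop_eq_nil_iff.mpr (by omega)] at hc; simp at hc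
        refine ⟨by simp, le_refl _, by omega, hklt, by simp [pvGk_nil], ?_, by omega⟩
        have hm : s ∈ pop.drop k := by simpa using hc
        simp [pvMis, hm, hadv]
      · rw [if_neg hc] at h
        match hr : pvFirstMis pop k rest with
        | none => rw [hr] at h; simp at h
        | some (j', kj') =>
          rw [hr] at h
          simp at h
          obtain ⟨rfl, rfl⟩ := h
          obtain ⟨h1, h2, h3, h4, h5, h6, h7⟩ := ih k j' kj' hr
          refine ⟨by simp only [List.length_cons]; omega, h2, by omega, h4, ?_, ?_, ?_⟩
          · rw [List.take_succ_cons, pvGk_cons, if_neg hadv]; exact h5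
          · rw [List.getElem!_cons_succ]; exact h6
          · intro j'' hj''
            match j'' with
            | 0 =>
              simp only [List.getElem!_cons_zero, List.take_zero, pvGk_nil]
              have hm : s ∉ pop.drop k := by simpa using hc
              simp [pvMis, hm]
            | Nat.succ j3 =>
              have := h7 j3 (by omega)
              rw [List.take_succ_cons, pvGk_cons, if_neg hadv, List.getElem!_cons_succ]
              exact this

lemma pvFirstMis_none (pop : List Int) (xs : List Int) :
    ∀ k, pvFirstMis pop k xs = none →
      ∀ j < xs.length, pvMis pop (pvGk pop k (xs.take j)) xs[j]! = false := by
  induction xs with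
  | nil => intro k _ j hj; simp at hj
  | cons s rest ih =>
    intro k h j hj
    rw [pvFirstMis] at h
    by_cases hadv : pop[k]? = some s
    · rw [if_pos hadv] at h
      have hr : pvFirstMis pop (k + 1) rest = none := by
        match hr : pvFirstMis pop (k + 1) rest with
        | none => rfl
        | some p => rw [hr] at h; simp at h
      match j with
      | 0 =>
        simp only [List.getElem!_cons_zero, List.take_zero, pvGk_nil]
        simp [pvMis, hadv]
      | Nat.succ j3 =>
        have := ih (k + 1) hr j3 (by simp only [List.length_cons] at hj; omega)
        rw [List.take_succ_cons, pvGk_cons, if_pos hadv, List.getElem!_cons_succ]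
        exact this
    · rw [if_neg hadv] at h
      by_cases hc : (pop.drop k).contains s
      · rw [if_pos hc] at h; simp at h
      · rw [if_neg hc] at h
        have hr : pvFirstMis pop k rest = none := by
          match hr : pvFirstMis pop k rest with
          | none => rfl
          | some p => rw [hr] at h; simp at h
        match j with
        | 0 =>
          simp only [List.getElem!_cons_zero, List.take_zero, pvGk_nil]
          have hm : s ∉ pop.drop k := by simpa using hc
          simp [pvMis, hm]
        | Nat.succ j3 =>
          have := ih k hr j3 (by simp only [List.length_cons] at hj; omega)
          rw [List.take_succ_cons, pvGk_cons, if_neg hadv, List.getElem!_cons_succ]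
          exact this

-- ===== master characterization of PORT A =====
-- From state (cursor i, k skills popped), with the unread suffix rest = user.drop i:
-- A returns 0 iff the first remaining mismatch is reached before the cursor/remaining-length
-- break fires; the junk 0 of the none-branch (A raising) occurs only outside Pre_.
lemma pop_skill_loop_eq (pop user : List Int) :
    ∀ (rest : List Int) (i k : Nat), rest = user.drop i → k ≤ pop.length →
      pop_skill_loop user (pop.drop k) i =
        match pvFirstMis pop k rest with
        | some (j, kj) => if 0 < j ∧ pop.length < i + j + kj then 1 else 0
        | none =>
          if k = pop.length then 1
          else if rest = [] then 0
          else if pop.length < i + rest.length + pvGk pop k rest then 1 else 0 := by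
  intro rest
  induction rest with
  | nil =>
    intro i k hrest hk
    have hni : user.length ≤ i := by
      have := List.drop_eq_nil_iff.mp hrest.symm
      omega
    simp only [pvFirstMis]
    by_cases hkm : k = pop.length
    · rw [List.drop_eq_nil_iff.mpr (by omega)]
      simp [pop_skill_loop, hkm]
    · have hklt : k < pop.length := lt_of_le_of_ne hk hkm
      have hh : pop.drop k = pop[k] :: pop.drop (k + 1) := List.drop_eq_getElem_cons hklt
      have hnone : PySem.List.pyGet? user (i : Int) = none := by
        simp [PySem.List.pyGet?_natCast, List.getElem?_eq_none hni]
      rw [hh, pop_skill_loop]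
      split
      · simp [hkm]
      · next x heq => rw [hnone] at heq; exact absurd heq (by simp)
  | cons s rest' ih =>
    intro i k hrest hk
    have hiu : i < user.length := by
      by_contra h
      have : user.drop i = [] := List.drop_eq_nil_iff.mpr (by omega)
      rw [this] at hrest
      exact (List.cons_ne_nil _ _) hrest
    have hs : user[i]? = some s := by
      have h0 : (user.drop i)[0]? = some s := by rw [← hrest]; rfl
      simpa [List.getElem?_drop] using h0
    have hrest' : rest' = user.drop (i + 1) := by
      have h1 : (user.drop i).tail = user.drop (i + 1) := by rw [List.tail_drop]
      rw [← hrest] at h1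
      simpa using h1
    have hget : PySem.List.pyGet? user (i : Int) = some s := by
      simp [PySem.List.pyGet?_natCast, hs]
    by_cases hkm : k = pop.length
    · subst hkm
      rw [List.drop_length, pvFirstMis_none_of_ge pop (s :: rest') pop.length (le_refl _)]
      simp [pop_skill_loop]
    · have hklt : k < pop.length := lt_of_le_of_ne hk hkm
      have hh : pop.drop k = pop[k] :: pop.drop (k + 1) := List.drop_eq_getElem_cons hklt
      have hlen_t : (pop.drop (k + 1)).length = pop.length - (k + 1) := List.length_drop
      rw [hh, pop_skill_loop]
      split
      · next heq => exact absurd heq (by simp [hget])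
      next x heq =>
      rw [hget] at heq
      obtain rfl : s = x := Option.some.inj heq
      by_cases hadv : pop[k]? = some s
      · -- next required skill acquired: k advances
        have hsk : s = pop[k] := by
          rw [List.getElem?_eq_getElem hklt] at hadv
          exact (Option.some.inj hadv).symm
        rw [if_pos (by simp only [hsk, List.contains_cons, beq_self_eq_true, Bool.true_or]),
          if_pos hsk, hlen_t]
        rw [pvFirstMis, if_pos hadv]
        have hkf_ge := pvGk_ge pop rest' (k + 1)
        have hkf_le := pvGk_le_len pop rest' (k + 1) (by omega)
        have hIH := ih (i + 1) (k + 1) hrest' (by omega)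
        match hFM : pvFirstMis pop (k + 1) rest' with
        | none =>
          rw [hFM] at hIH
          simp only [] at hIH
          simp only [Option.map_none]
          rw [if_neg hkm, if_neg (List.cons_ne_nil s rest'), List.length_cons, pvGk_cons,
            if_pos hadv, hIH]
          rcases eq_or_ne rest' ([] : List Int) with rfl | hne
          · rw [if_pos rfl]
            simp only [pvGk_nil, List.length_nil]
            split_ifs <;> omega
          · rw [if_neg hne]
            split_ifs <;> omega
        | some (j', kj') =>
          obtain ⟨hb1, hb2, hb3, hb4, _, _, _⟩ := pvFirstMis_some pop rest' (k + 1) j' kj' hFM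
          rw [hFM] at hIH
          simp only [] at hIH
          simp only [Option.map_some]
          rw [hIH]
          split_ifs <;> omega
      · -- s is not the next required skill
        have hsk : ¬ s = pop[k] := by
          intro hE
          rw [List.getElem?_eq_getElem hklt] at hadv
          exact hadv (by rw [hE])
        rw [pvFirstMis, if_neg hadv]
        by_cases hcon : (pop[k] :: pop.drop (k + 1)).contains s = true
        · -- mismatch: still required but out of order, A returns 0 immediately
          rw [if_pos hcon, if_neg hsk,
            if_pos (show (pop.drop k).contains s = true from by rw [hh]; exact hcon)]
          simp
        · -- s not required any more: skipped
          rw [if_neg hcon,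
            if_neg (show ¬ (pop.drop k).contains s = true from by rw [hh]; exact hcon),
            ← hh, List.length_drop]
          have hkf_ge := pvGk_ge pop rest' k
          have hkf_le := pvGk_le_len pop rest' k (by omega)
          have hIH := ih (i + 1) k hrest' (by omega)
          match hFM : pvFirstMis pop k rest' with
          | none =>
            rw [hFM] at hIH
            simp only [] at hIH
            simp only [Option.map_none]
            rw [if_neg hkm, if_neg (List.cons_ne_nil s rest'), List.length_cons, pvGk_cons,
              if_neg hadv, hIH]
            rcases eq_or_ne rest' ([] : List Int) with rfl | hne
            · rw [if_pos rfl]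
              simp only [pvGk_nil, List.length_nil]
              split_ifs <;> omega
            · rw [if_neg hne]
              split_ifs <;> omega
          | some (j', kj') =>
            obtain ⟨hb1, hb2, hb3, hb4, _, _, _⟩ := pvFirstMis_some pop rest' k j' kj' hFM
            rw [hFM] at hIH
            simp only [] at hIH
            simp only [Option.map_some]
            rw [hIH]
            split_ifs <;> omega

-- ===== characterization of PORT B =====
lemma pop_skill_alt_loop_eq (pop : List Int) :
    ∀ (rest : List Int) (k : Nat) (counts : PySem.Dict Int Int),
      k ≤ pop.length →
      (∀ x, counts.getD x 0 = ((pop.drop k).count x : Int)) →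
      pop_skill_alt_loop pop counts k rest =
        if (pvFirstMis pop k rest).isSome then 0 else 1 := by
  intro rest
  induction rest with
  | nil => intro k counts _ _; simp [pop_skill_alt_loop, pvFirstMis]
  | cons s rest' ih =>
    intro k counts hk hcnt
    by_cases hkm : k = pop.length
    · subst hkm
      rw [pvFirstMis_none_of_ge pop (s :: rest') pop.length (le_refl _)]
      simp [pop_skill_alt_loop]
    · have hklt : k < pop.length := lt_of_le_of_ne hk hkm
      have hh : pop.drop k = pop[k] :: pop.drop (k + 1) := List.drop_eq_getElem_cons hklt
      have hpk : PySem.List.pyGet? pop (k : Int) = some pop[k] := by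
        simp [PySem.List.pyGet?_natCast, List.getElem?_eq_getElem hklt]
      rw [pop_skill_alt_loop, if_neg hkm, pvFirstMis]
      by_cases hadv : pop[k]? = some s
      · have hsk : pop[k] = s := by
          rw [List.getElem?_eq_getElem hklt] at hadv
          exact Option.some.inj hadv
        rw [if_pos (by rw [hpk, hsk]), if_pos hadv]
        rw [ih (k + 1) _ (by omega) ?_]
        · cases pvFirstMis pop (k + 1) rest' <;> simp
        · intro x
          rw [PySem.Dict.getD_insert]
          by_cases hx : x = s
          · subst hx
            rw [if_pos rfl, hcnt x, hh, hsk, List.count_cons_self]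
            push_cast
            ring
          · rw [if_neg hx, hcnt x, hh, List.count_cons_of_ne (by rw [hsk]; exact Ne.symm hx)]
      · have hsk : ¬ PySem.List.pyGet? pop (k : Int) = some s := by
          rw [hpk]
          intro hE
          exact hadv (by rw [List.getElem?_eq_getElem hklt, hE])
        rw [if_neg hsk, if_neg hadv]
        have hcm : (counts.getD s 0 > 0) ↔ (pop.drop k).contains s = true := by
          rw [hcnt s]
          constructor
          · intro hgt
            have : 0 < (pop.drop k).count s := by exact_mod_cast hgt
            simpa using List.count_pos_iff.mp this
          · intro hc
            have : s ∈ pop.drop k := by simpa using hc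
            have := List.count_pos_iff.mpr this
            exact_mod_cast this
        by_cases hc : (pop.drop k).contains s = true
        · rw [if_pos (hcm.mpr hc), if_pos hc]
          simp
        · rw [if_neg (fun hgt => hc (hcm.mp hgt)), if_neg hc]
          rw [ih k counts hk hcnt]
          cases pvFirstMis pop k rest' <;> simp

lemma pop_skill_alt_char (pop user : List Int) :
    pop_skill_alt pop user = if (pvFirstMis pop 0 user).isSome then 0 else 1 := by
  unfold pop_skill_alt
  rw [PySem.Dict.foldl_insert_getD_add_one_eq_counter pop]
  apply pop_skill_alt_loop_eq pop user 0 _ (by omega)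
  intro x
  rw [PySem.Dict.getD_counter]
  simp

lemma pop_skill_char (pop user : List Int) :
    pop_skill pop user =
      match pvFirstMis pop 0 user with
      | some (j, kj) => if 0 < j ∧ pop.length < j + kj then 1 else 0
      | none =>
        if pop = [] then 1
        else if user = [] then 0
        else if pop.length < user.length + pvGk pop 0 user then 1 else 0 := by
  have h := pop_skill_loop_eq pop user user 0 0 (by simp) (by omega)
  simp only [List.drop_zero, Nat.zero_add] at h
  unfold pop_skill
  rw [h]
  cases hF : pvFirstMis pop 0 user with
  | some p => rfl
  | none =>
    by_cases hP : pop = []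
    · subst hP; simp
    · have hl : ¬ (0 = pop.length) := by
        intro h0
        exact hP (List.length_eq_zero_iff.mp h0.symm)
      simp only []
      rw [if_neg hl, if_neg hP]

-- bridge: pvLateMis against the first-mismatch analysis
lemma pvLateMis_eq (pop : List Int) (xs : List Int) :
    ∀ (k j : Nat), k ≤ pop.length →
      pvLateMis j (pop.drop k) xs =
        match pvFirstMis pop k xs with
        | some (j', kj') => decide (pop.length - kj' < j + j')
        | none => false := by
  induction xs with
  | nil => intro k j _; simp [pvLateMis, pvFirstMis]
  | cons s rest ih =>
    intro k j hk
    rw [pvLateMis, pvFirstMis, List.head?_drop]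
    by_cases hadv : pop[k]? = some s
    · rw [if_pos hadv, if_pos hadv, List.tail_drop]
      have hklt : k < pop.length := (List.getElem?_eq_some_iff.mp hadv).1
      rw [ih (k + 1) (j + 1) (by omega)]
      cases hFM : pvFirstMis pop (k + 1) rest with
      | none => simp
      | some p =>
        obtain ⟨j', kj'⟩ := p
        simp only [Option.map_some]
        simp only [decide_eq_decide]
        omega
    · rw [if_neg hadv, if_neg hadv]
      by_cases hc : s ∈ pop.drop k
      · rw [if_pos hc, if_pos (by simpa using hc)]
        rw [List.length_drop]
        simp only []
        rw [Bool.eq_iff_iff]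
        simp [Nat.blt_eq]
      · rw [if_neg hc, if_neg (by simpa using hc), ih k (j + 1) hk]
        cases hFM : pvFirstMis pop k rest with
        | none => simp
        | some p =>
          obtain ⟨j', kj'⟩ := p
          simp only [Option.map_some]
          simp only [decide_eq_decide]
          omega

-- ===== VERDICT =====
theorem pop_skill_spec : Claim_unchanged_pop_skill := by
  intro pop user _ hpre hnd
  rw [pop_skill_char, pop_skill_alt_char]
  cases hF : pvFirstMis pop 0 user with
  | none =>
    rw [show (if (none : Option (Nat × Nat)).isSome = true then (0 : Int) else 1) = 1 from by
      simp]
    simp only []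
    rcases hpre with hP | hmis | ⟨hne, hbig⟩
    · rw [if_pos hP]
    · obtain ⟨j, hj, hm⟩ := hmis
      have := pvFirstMis_none pop user 0 hF j hj
      rw [hm] at this
      exact absurd this (by simp)
    · by_cases hP : pop = []
      · rw [if_pos hP]
      · rw [if_neg hP, if_neg hne, if_pos hbig]
  | some p =>
    obtain ⟨j, kj⟩ := p
    obtain ⟨h1, h2, h3, h4, h5, h6, h7⟩ := pvFirstMis_some pop user 0 j kj hF
    rw [show (if (some (j, kj)).isSome = true then (0 : Int) else 1) = 0 from by simp]
    simp only []
    have hL := pvLateMis_eq pop user 0 0 (by omega)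
    simp only [List.drop_zero] at hL
    rw [hF] at hL
    simp only [] at hL
    have hcc : ¬ (0 < j ∧ pop.length < j + kj) := by
      rintro ⟨hj0, hbrk⟩
      apply hnd
      unfold D_pop_skill
      rw [hL]
      simp only [decide_eq_true_eq]
      omega
    rw [if_neg hcc]

theorem pop_skill_changed : Claim_changed_pop_skill := by
  unfold Claim_changed_pop_skill
  refine ⟨by decide, by decide, by decide, ?_, by decide, by decide⟩
  show pop_skill [1, 2] [3, 3, 3, 2] = 1
  rw [pop_skill_char]
  decide

theorem pop_skill_tight : Claim_exact_pop_skill := by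
  intro pop user _ _ hD
  unfold D_pop_skill at hD
  have hL := pvLateMis_eq pop user 0 0 (by omega)
  simp only [List.drop_zero] at hL
  rw [pop_skill_char, pop_skill_alt_char]
  cases hF : pvFirstMis pop 0 user with
  | none =>
    rw [hF] at hL
    simp only [] at hL
    rw [hD] at hL
    exact absurd hL.symm (by simp)
  | some p =>
    obtain ⟨j, kj⟩ := p
    obtain ⟨h1, h2, h3, h4, h5, h6, h7⟩ := pvFirstMis_some pop user 0 j kj hF
    rw [hF] at hL
    simp only [] at hL
    rw [hD] at hL
    have hbk : pop.length - kj < j := by simpa using hL.symm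
    simp only []
    rw [if_pos (⟨by omega, by omega⟩ : 0 < j ∧ pop.length < j + kj),
      show (if (some (j, kj)).isSome = true then (0 : Int) else 1) = 0 from by simp]
    decide
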